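-- pv_equiv track=rewrite | github.com/umar-ali/umar-solves | leetcode/LT-MEDIUM/max-act-section.py | solve
-- ===== SOURCE A (Python) =====
-- def solve(s:str)->int:
--     curr, prev, inactive, active, i = [0] * 5
--     aug_str = "1" + s + "1"
--     l = len(aug_str)
--
--     while i < l and aug_str[i]=="1":
--         active+=1
--         i+=1
--
--     while i < l and aug_str[i]=="0":
--         prev+=1
--         i+=1
--
--     while i < l:
--         while i < l and aug_str[i]=="1":
--             active+=1
--             i+=1
--         if i == l:
--             break
--         while i < l and aug_str[i]=="0":
--             curr+=1
--             i+=1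
--         inactive = max(inactive, prev + curr )
--         prev = curr
--         curr = 0
--     return active + inactive - 2
-- ===== SOURCE B (Python) =====
-- def solve(s: str) -> int:
--     # tabulate the maximal zero-run lengths, then take the best adjacent pair
--     runs = [len(r) for r in s.split('1') if r]
--     best = 0
--     for a, b in zip(runs, runs[1:]):
--         best = max(best, a + b)
--     return s.count('1') + best
-- ===== Notes on version B (the rewrite author's own statement) =====
-- stated objective: simpler
-- what changed: Replaces A's manual-index five-variable while-loop state machine over an augmented string with a decomposition: split the string on the one-digit separator to tabulate the maximal zero-run lengths, then take the maximum sum of adjacent run pairs and add the number of set characters; Pre_ excludes strings containing a character other than the two binary digits, on which A's outer while loop makes no progress and A diverges.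
import Mathlib
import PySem

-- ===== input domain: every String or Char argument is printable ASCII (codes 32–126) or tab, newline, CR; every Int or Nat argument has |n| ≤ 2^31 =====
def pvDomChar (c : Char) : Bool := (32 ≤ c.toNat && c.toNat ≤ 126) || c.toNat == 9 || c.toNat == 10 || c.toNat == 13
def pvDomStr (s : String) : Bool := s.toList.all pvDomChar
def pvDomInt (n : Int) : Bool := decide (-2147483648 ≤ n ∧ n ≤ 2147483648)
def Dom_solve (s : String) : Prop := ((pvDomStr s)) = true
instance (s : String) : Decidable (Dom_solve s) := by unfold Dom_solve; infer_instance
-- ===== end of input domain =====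

-- B's change in one line: tabulate the maximal zero-run lengths (split on '1'), take the best
-- adjacent pair and add the count of ones, instead of A's manual-index while-loop state machine.

-- ===== PORT A =====
-- while i < l and aug[i]=='1': active+=1; i+=1   (recursion on the remaining characters)
def solveOnes : List Char → Int → Int × List Char
  | [], active => (active, [])
  | c :: rest, active => if c = '1' then solveOnes rest (active + 1) else (active, c :: rest)

-- while i < l and aug[i]=='0': n+=1; i+=1   (used for both `prev` and `curr`)
def solveZeros : List Char → Int → Int × List Char
  | [], n => (n, [])
  | c :: rest, n => if c = '0' then solveZeros rest (n + 1) else (n, c :: rest)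

-- the outer while loop; fuel only guards termination: on inputs where the Python loop makes
-- no progress (a character other than '0'/'1') Python diverges, which Pre_solve excludes
def solveMain : Nat → List Char → Int → Int → Int → Int × Int
  | 0, _, _, inactive, active => (active, inactive)
  | fuel + 1, l, prev, inactive, active =>
      let p1 := solveOnes l active
      if p1.2 = [] then (p1.1, inactive)
      else
        let p2 := solveZeros p1.2 0
        solveMain fuel p2.2 p2.1 (max inactive (prev + p2.1)) p1.1

def solve (s : String) : Int :=
  let aug : List Char := '1' :: s.toList ++ ['1']
  let p1 := solveOnes aug 0
  let p2 := solveZeros p1.2 0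
  let r := solveMain (p2.2.length + 1) p2.2 p2.1 0 p1.1
  r.1 + r.2 - 2

-- ===== PORT B =====
-- s.split('1'): the separator "1" is non-empty, so PySem.Chars.splitOn is exactly it
def solve_alt (s : String) : Int :=
  let runs : List Int :=
    ((PySem.Chars.splitOn s.toList ['1']).filter (fun r => !r.isEmpty)).map
      (fun r => (r.length : Int))
  let best : Int := (runs.zip (runs.drop 1)).foldl (fun b p => max b (p.1 + p.2)) 0
  (PySem.Str.count s "1" : Int) + best

-- ===== PRECONDITION & SPEC =====
-- Pre_ excludes strings containing a character other than the two binary digits: there A's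
-- outer while loop makes no progress and the Python diverges (returns nothing).
def Pre_solve (s : String) : Prop := (s.toList.all (fun c => c == '0' || c == '1')) = true
instance (s : String) : Decidable (Pre_solve s) := by unfold Pre_solve; infer_instance
def pvWitness_solve : String := "100100010"
def Spec_solve (s : String) (out : Int) : Prop := out = solve_alt s
instance (s : String) (out : Int) : Decidable (Spec_solve s out) := by unfold Spec_solve; infer_instance

-- ===== CLAIM (what is proved, stated in full; the proofs are below) =====
def Claim_equal_solve : Prop := ∀ (s : String), Dom_solve s → Pre_solve s → Spec_solve s (solve s)

-- ===== LEMMAS AND PROOFS =====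


def non1 (c : Char) : Bool := !(c == '1')

def zruns (l : List Char) : List Int :=
  match h : l with
  | [] => []
  | c :: t =>
    if c = '1' then zruns t
    else ((l.takeWhile non1).length : Int) :: zruns (l.dropWhile non1)
termination_by l.length
decreasing_by
  · simp [h]
  · simp only [h, List.dropWhile_cons, non1]
    simp_all
    have := List.length_dropWhile_le non1 t
    omega

def pairBest : List Int → Int
  | a :: b :: t => max (a + b) (pairBest (b :: t))
  | _ => 0

theorem zruns_nil : zruns [] = [] := by rw [zruns]

theorem zruns_one_cons (t : List Char) : zruns ('1' :: t) = zruns t := by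
  rw [zruns]; simp

theorem zruns_cons_non1 (c : Char) (t : List Char) (h : c ≠ '1') :
    zruns (c :: t) = (((c :: t).takeWhile non1).length : Int) :: zruns ((c :: t).dropWhile non1) := by
  rw [zruns]; simp [h]

theorem zruns_ones_append (o X : List Char) (h : ∀ c ∈ o, c = '1') :
    zruns (o ++ X) = zruns X := by
  induction o with
  | nil => rfl
  | cons c t ih =>
    have hc : c = '1' := h c (by simp)
    subst hc
    rw [List.cons_append, zruns_one_cons]
    exact ih (fun c hc => h c (by simp [hc]))

theorem dropWhile_head_not {p : Char → Bool} {l : List Char} {c : Char} {t : List Char}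
    (h : l.dropWhile p = c :: t) : p c = false := by
  induction l with
  | nil => simp at h
  | cons a l ih =>
    rw [List.dropWhile_cons] at h
    by_cases hp : p a
    · simp [hp] at h; exact ih h
    · simp [hp] at h; rw [← h.1]; simpa using hp

theorem zruns_append_one (X : List Char) : zruns (X ++ ['1']) = zruns X := by
  induction X using zruns.induct with
  | case1 => rw [zruns_nil]; rw [show ([] : List Char) ++ ['1'] = ['1'] from rfl, zruns_one_cons, zruns_nil]
  | case2 t ih =>
    rw [List.cons_append, zruns_one_cons, zruns_one_cons, ih]
  | case3 c t hc ih =>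
    by_cases hd : (c :: t).dropWhile non1 = []
    · have htw : (c :: t).takeWhile non1 = c :: t := by
        have := List.takeWhile_append_dropWhile (p := non1) (l := c :: t)
        rw [hd, List.append_nil] at this; exact this
      rw [List.cons_append, zruns_cons_non1 _ _ hc, zruns_cons_non1 _ _ hc]
      rw [← List.cons_append, List.takeWhile_append, List.dropWhile_append]
      rw [htw, hd]
      simp [non1, zruns_one_cons, zruns_nil]
    · rw [List.cons_append, zruns_cons_non1 _ _ hc, zruns_cons_non1 _ _ hc]
      rw [← List.cons_append, List.takeWhile_append, List.dropWhile_append]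
      have hlt : ((c :: t).takeWhile non1).length ≠ (c :: t).length := by
        intro hEq
        have := List.takeWhile_append_dropWhile (p := non1) (l := c :: t)
        have : (c :: t).dropWhile non1 = [] := by
          have h2 := congrArg List.length this
          rw [List.length_append, hEq] at h2
          have : ((c :: t).dropWhile non1).length = 0 := by omega
          exact List.length_eq_zero_iff.mp this
        exact hd this
      rw [if_neg hlt, if_neg (by simpa using hd)]
      rw [ih]

def Bin (l : List Char) : Prop := ∀ c ∈ l, c = '0' ∨ c = '1'

theorem solveOnes_eq (l : List Char) (a : Int) :
    solveOnes l a = (a + ((l.takeWhile (· == '1')).length : Int), l.dropWhile (· == '1')) := by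
  induction l generalizing a with
  | nil => simp [solveOnes]
  | cons c t ih =>
    by_cases hc : c = '1'
    · subst hc; simp [solveOnes, ih]; push_cast; ring
    · simp [solveOnes, hc]

theorem solveZeros_eq (l : List Char) (a : Int) :
    solveZeros l a = (a + ((l.takeWhile (· == '0')).length : Int), l.dropWhile (· == '0')) := by
  induction l generalizing a with
  | nil => simp [solveZeros]
  | cons c t ih =>
    by_cases hc : c = '0'
    · subst hc; simp [solveZeros, ih]; push_cast; ring
    · simp [solveZeros, hc]

theorem takeWhile_zero_eq (l : List Char) (h : Bin l) :
    l.takeWhile (· == '0') = l.takeWhile non1 := by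
  induction l with
  | nil => rfl
  | cons c t ih =>
    have ht : Bin t := fun x hx => h x (by simp [hx])
    rcases h c (by simp) with hc | hc <;> subst hc <;>
      simp [List.takeWhile_cons, non1, ih ht]

theorem dropWhile_zero_eq (l : List Char) (h : Bin l) :
    l.dropWhile (· == '0') = l.dropWhile non1 := by
  induction l with
  | nil => rfl
  | cons c t ih =>
    have ht : Bin t := fun x hx => h x (by simp [hx])
    rcases h c (by simp) with hc | hc <;> subst hc <;>
      simp [List.dropWhile_cons, non1, ih ht]

theorem count_one_takeWhile_non1 (l : List Char) : (l.takeWhile non1).count '1' = 0 := by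
  rw [List.count_eq_zero]
  intro h
  have := List.mem_takeWhile_imp h
  simp [non1] at this

theorem count_one_ones (l : List Char) : (l.takeWhile (· == '1')).count '1' = (l.takeWhile (· == '1')).length := by
  rw [List.count_eq_length]
  intro c hc
  have := List.mem_takeWhile_imp hc
  have : c = '1' := by simpa using this
  exact this.symm

theorem Bin_sub {l l' : List Char} (h : Bin l) (hs : l'.Sublist l) : Bin l' :=
  fun c hc => h c (hs.mem hc)

theorem solveMain_eq (fuel : Nat) (r : List Char) (prev inactive active : Int)
    (hb : Bin r) (hf : r.length < fuel) (hi : 0 ≤ inactive) :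
    solveMain fuel r prev inactive active =
      (active + (r.count '1' : Int), max inactive (pairBest (prev :: zruns r))) := by
  induction fuel generalizing r prev inactive active with
  | zero => omega
  | succ fuel ih =>
    rw [solveMain]
    simp only [solveOnes_eq]
    by_cases h1 : r.dropWhile (· == '1') = []
    · -- the rest of r is all ones
      rw [if_pos h1]
      have hall : ∀ c ∈ r, c = '1' := by
        intro c hc
        have : r.takeWhile (· == '1') = r := by
          have := List.takeWhile_append_dropWhile (p := (· == '1')) (l := r)
          rw [h1, List.append_nil] at this; exact this
        rw [← this] at hc
        simpa using List.mem_takeWhile_imp hc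
      have hz : zruns r = [] := by
        have := zruns_ones_append r [] hall
        simpa [zruns_nil] using this
      have hcnt : r.count '1' = r.length := by
        rw [List.count_eq_length]; intro c hc; exact ((hall c hc) ▸ rfl)
      have htw : r.takeWhile (· == '1') = r := by
        have := List.takeWhile_append_dropWhile (p := (· == '1')) (l := r)
        rw [h1, List.append_nil] at this; exact this
      rw [hz, hcnt, htw]
      simp [pairBest, hi]
    · rw [if_neg h1]
      simp only [solveZeros_eq]
      set r1 := r.dropWhile (· == '1') with hr1
      have hbr1 : Bin r1 := Bin_sub hb (List.dropWhile_sublist _)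
      obtain ⟨c, t, hct⟩ : ∃ c t, r1 = c :: t := by
        cases hh : r1 with
        | nil => exact absurd hh h1
        | cons c t => exact ⟨c, t, rfl⟩
      have hc0 : c = '0' := by
        have hne1 : (c == '1') = false := dropWhile_head_not (p := (· == '1')) (hr1.symm.trans hct)
        rcases hbr1 c (by rw [hct]; simp) with h | h
        · exact h
        · simp [h] at hne1
      have htwz : r1.takeWhile (· == '0') = r1.takeWhile non1 := takeWhile_zero_eq _ hbr1
      have hdwz : r1.dropWhile (· == '0') = r1.dropWhile non1 := dropWhile_zero_eq _ hbr1
      set r2 := r1.dropWhile non1 with hr2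
      have hlen2 : r2.length < r1.length := by
        rw [hr2, hct]
        have hcn : non1 c = true := by simp [non1, hc0]
        rw [List.dropWhile_cons, if_pos hcn]
        have := List.length_dropWhile_le non1 t
        simp; omega
      have hlen1 : r1.length ≤ r.length := by
        rw [hr1]; exact List.length_dropWhile_le _ _
      have hbr2 : Bin r2 := Bin_sub hbr1 (List.dropWhile_sublist _)
      rw [htwz, hdwz]
      simp only [zero_add]
      rw [ih r2 _ _ _ hbr2 (by omega) (le_max_of_le_left hi), Prod.mk.injEq]
      constructor
      · -- count part
        show active + ↑(List.takeWhile (fun x => x == '1') r).length + ↑(List.count '1' r2) = active + ↑(List.count '1' r)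
        have h1 : r.count '1' = (r.takeWhile (· == '1')).count '1' + r1.count '1' := by
          conv_lhs => rw [← List.takeWhile_append_dropWhile (p := (· == '1')) (l := r)]
          rw [List.count_append, ← hr1]
        have h2 : r1.count '1' = (r1.takeWhile non1).count '1' + r2.count '1' := by
          conv_lhs => rw [← List.takeWhile_append_dropWhile (p := non1) (l := r1)]
          rw [List.count_append, ← hr2]
        have h3 := count_one_takeWhile_non1 r1
        have h4 := count_one_ones r
        have htot : r.count '1' = (r.takeWhile (· == '1')).length + r2.count '1' := by omega
        rw [htot]; push_cast; ring
      · -- inactive part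
        have hzr : zruns r = ((r1.takeWhile non1).length : Int) :: zruns r2 := by
          have hones : ∀ x ∈ r.takeWhile (· == '1'), x = '1' := by
            intro x hx; simpa using List.mem_takeWhile_imp hx
          conv_lhs => rw [← List.takeWhile_append_dropWhile (p := (· == '1')) (l := r)]
          rw [zruns_ones_append _ _ hones, ← hr1, hct, zruns_cons_non1 c t (by simp [hc0]), ← hct]
        rw [hzr]
        show max (max inactive (prev + ↑(List.takeWhile non1 r1).length)) (pairBest (↑(List.takeWhile non1 r1).length :: zruns r2)) = max inactive (pairBest (prev :: ↑(List.takeWhile non1 r1).length :: zruns r2))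
        rw [show pairBest (prev :: ↑(List.takeWhile non1 r1).length :: zruns r2) = max (prev + ↑(List.takeWhile non1 r1).length) (pairBest (↑(List.takeWhile non1 r1).length :: zruns r2)) from rfl]
        rw [max_assoc]

theorem solveA (s : String) (h : Bin s.toList) :
    solve s = (s.toList.count '1' : Int) + max 0 (pairBest (zruns s.toList)) := by
  unfold solve
  set L := s.toList with hL
  set aug := '1' :: L ++ ['1'] with haug
  have hbaug : Bin aug := by
    intro c hc
    rw [haug, List.cons_append, List.mem_cons] at hc
    rcases hc with hc | hc
    · right; exact hc
    · rcases List.mem_append.mp hc with hc | hc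
      · exact h c hc
      · right; simpa using hc
  have hcntaug : aug.count '1' = L.count '1' + 2 := by
    rw [haug]; simp [List.count_cons, List.count_append]
  have hzaug : zruns aug = zruns L := by
    rw [haug, List.cons_append, zruns_one_cons, zruns_append_one]
  simp only [solveOnes_eq, solveZeros_eq, zero_add]
  set r1 := aug.dropWhile (· == '1') with hr1
  have hbr1 : Bin r1 := Bin_sub hbaug (List.dropWhile_sublist _)
  rw [takeWhile_zero_eq r1 hbr1, dropWhile_zero_eq r1 hbr1]
  set r2 := r1.dropWhile non1 with hr2
  have hbr2 : Bin r2 := Bin_sub hbr1 (List.dropWhile_sublist _)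
  rw [solveMain_eq _ r2 _ 0 _ hbr2 (by omega) le_rfl]
  simp only
  by_cases h1 : r1 = []
  · have htw : aug.takeWhile (· == '1') = aug := by
      have := List.takeWhile_append_dropWhile (p := (· == '1')) (l := aug)
      rw [← hr1, h1, List.append_nil] at this; exact this
    have hall : ∀ c ∈ aug, c = '1' := by
      intro c hc
      rw [← htw] at hc
      have : c = '1' := by simpa using List.mem_takeWhile_imp hc
      exact this
    have hz : zruns aug = [] := by simpa [zruns_nil] using zruns_ones_append aug [] hall
    have hcnt : aug.count '1' = aug.length := by
      rw [List.count_eq_length]; intro c hc; exact (hall c hc).symm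
    have hr2nil : r2 = [] := by rw [hr2, h1]; rfl
    have hzL : zruns L = [] := hzaug.symm.trans hz
    rw [h1, hr2nil, hzL]
    simp only [List.takeWhile_nil, List.length_nil, List.count_nil, htw, zruns_nil]
    simp only [pairBest]
    have hcnt' : ((aug.count '1' : Nat) : Int) = ((aug.length : Nat) : Int) := by exact_mod_cast hcnt
    have hcnt2 : ((aug.count '1' : Nat) : Int) = ((L.count '1' : Nat) : Int) + 2 := by exact_mod_cast hcntaug
    simp
    omega
  · obtain ⟨c, t, hct⟩ : ∃ c t, r1 = c :: t := by
      cases hh : r1 with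
      | nil => exact absurd hh h1
      | cons c t => exact ⟨c, t, rfl⟩
    have hc0 : c = '0' := by
      have hne1 : (c == '1') = false := dropWhile_head_not (p := (· == '1')) (hr1.symm.trans hct)
      rcases hbr1 c (by rw [hct]; simp) with hx | hx
      · exact hx
      · simp [hx] at hne1
    have hones : ∀ x ∈ aug.takeWhile (· == '1'), x = '1' := by
      intro x hx; simpa using List.mem_takeWhile_imp hx
    have hzr : zruns aug = ((r1.takeWhile non1).length : Int) :: zruns r2 := by
      conv_lhs => rw [← List.takeWhile_append_dropWhile (p := (· == '1')) (l := aug)]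
      rw [zruns_ones_append _ _ hones, ← hr1, hct, zruns_cons_non1 c t (by simp [hc0]), ← hct, hr2]
    have hca : aug.count '1' = (aug.takeWhile (· == '1')).count '1' + r1.count '1' := by
      conv_lhs => rw [← List.takeWhile_append_dropWhile (p := (· == '1')) (l := aug)]
      rw [List.count_append, ← hr1]
    have hca2 : r1.count '1' = (r1.takeWhile non1).count '1' + r2.count '1' := by
      conv_lhs => rw [← List.takeWhile_append_dropWhile (p := non1) (l := r1)]
      rw [List.count_append, ← hr2]
    have h3 := count_one_takeWhile_non1 r1
    have h4 := count_one_ones aug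
    have htot : aug.count '1' = (aug.takeWhile (· == '1')).length + r2.count '1' := by omega
    rw [← hzaug, hzr]
    have : ((aug.takeWhile (· == '1')).length : Int) + (r2.count '1' : Int) = (L.count '1' : Int) + 2 := by
      have : (((aug.count '1' : Nat)) : Int) = ((L.count '1' : Nat) : Int) + 2 := by exact_mod_cast hcntaug
      rw [← this, htot]; push_cast; ring
    omega

theorem countGo (fuel : Nat) (l : List Char) (acc : Nat) (hf : l.length ≤ fuel) :
    PySem.Chars.count.go ['1'] fuel l acc = acc + l.count '1' := by
  induction fuel generalizing l acc with
  | zero =>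
    have : l = [] := List.length_eq_zero_iff.mp (by omega)
    subst this
    simp [PySem.Chars.count.go]
  | succ fuel ih =>
    cases l with
    | nil => simp [PySem.Chars.count.go]
    | cons c t =>
      rw [PySem.Chars.count.go]
      by_cases hc : c = '1'
      · subst hc
        rw [if_pos (by simp [List.isPrefixOf])]
        simp only [List.length_cons, List.length_nil, List.drop_succ_cons, List.drop_zero]
        rw [ih t (acc + 1) (by simpa using Nat.le_of_succ_le_succ (by simpa using hf))]
        simp [List.count_cons]
        omega
      · rw [if_neg (by simp [List.isPrefixOf]; exact fun h => hc h.symm)]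
        rw [ih t acc (by simpa using Nat.le_of_succ_le_succ (by simpa using hf))]
        simp [List.count_cons, hc]

def pieces : List Char → List Char → List (List Char)
  | cur, [] => [cur.reverse]
  | cur, c :: t => if c = '1' then cur.reverse :: pieces [] t else pieces (c :: cur) t

theorem goP (fuel : Nat) (l cur : List Char) (acc : List (List Char)) (hf : l.length < fuel) :
    PySem.Chars.splitOn.go ['1'] fuel l cur acc = acc.reverse ++ pieces cur l := by
  induction fuel generalizing l cur acc with
  | zero => omega
  | succ fuel ih =>
    cases l with
    | nil => rw [PySem.Chars.splitOn.go]; simp [pieces]; omega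
    | cons c t =>
      rw [PySem.Chars.splitOn.go]
      by_cases hc : c = '1'
      · subst hc
        rw [if_pos (by simp [List.isPrefixOf])]
        simp only [List.length_cons, List.length_nil, List.drop_succ_cons, List.drop_zero]
        rw [ih t [] _ (by simpa using hf)]
        simp [pieces]
      · rw [if_neg (by simp [List.isPrefixOf]; exact fun h => hc h.symm)]
        rw [ih t (c :: cur) acc (by simpa using hf)]
        simp [pieces, hc]

theorem piecesP2 (l cur : List Char) :
    pieces cur l = (cur.reverse ++ l.takeWhile non1) ::
      (match l.dropWhile non1 with | [] => [] | _ :: t => pieces [] t) := by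
  induction l generalizing cur with
  | nil => simp [pieces]
  | cons c t ih =>
    by_cases hc : c = '1'
    · subst hc
      simp [pieces, List.takeWhile_cons, List.dropWhile_cons, non1]
    · rw [pieces, if_neg hc, ih (c :: cur)]
      have hcn : non1 c = true := by simp [non1, hc]
      simp [List.takeWhile_cons, List.dropWhile_cons, hcn]

theorem BtoZ (l : List Char) :
    ((pieces [] l).filter (fun r => !r.isEmpty)).map (fun r => (r.length : Int)) = zruns l := by
  induction l using zruns.induct with
  | case1 => simp [pieces, zruns_nil]
  | case2 t ih =>
    rw [pieces, if_pos rfl, zruns_one_cons]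
    simpa using ih
  | case3 c t hc ih =>
    rw [piecesP2, zruns_cons_non1 c t hc]
    have hcn : non1 c = true := by simp [non1, hc]
    have htwne : (c :: t).takeWhile non1 ≠ [] := by
      simp [List.takeWhile_cons, hcn]
    cases hd : (c :: t).dropWhile non1 with
    | nil =>
      simp only [hd, List.nil_append]
      rw [zruns_nil]
      simp [htwne]
    | cons c' t' =>
      have hc1 : c' = '1' := by
        have := dropWhile_head_not (p := non1) hd
        simpa [non1] using this
      subst hc1
      rw [hd] at ih
      rw [pieces, if_pos rfl] at ih
      simp only [List.nil_append]
      rw [List.filter_cons, if_pos (by simpa using htwne)]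
      rw [List.map_cons]
      congr 1

theorem foldPB (rs : List Int) (b : Int) (hb : 0 ≤ b) :
    (rs.zip (rs.drop 1)).foldl (fun m p => max m (p.1 + p.2)) b = max b (pairBest rs) := by
  induction rs generalizing b with
  | nil => simp [pairBest, max_eq_left hb]
  | cons a t ih =>
    cases t with
    | nil => simp [pairBest, max_eq_left hb]
    | cons a2 t2 =>
      have step : ((a :: a2 :: t2).zip ((a :: a2 :: t2).drop 1)).foldl
          (fun m p => max m (p.1 + p.2)) b
          = ((a2 :: t2).zip ((a2 :: t2).drop 1)).foldl (fun m p => max m (p.1 + p.2))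
              (max b (a + a2)) := by
        simp [List.zip]
      rw [step, ih (max b (a + a2)) (le_max_of_le_left hb)]
      rw [show pairBest (a :: a2 :: t2) = max (a + a2) (pairBest (a2 :: t2)) from rfl]
      rw [max_assoc]

theorem solveB (s : String) :
    solve_alt s = (s.toList.count '1' : Int) + max 0 (pairBest (zruns s.toList)) := by
  unfold solve_alt
  have h1 : PySem.Chars.splitOn s.toList ['1'] = pieces [] s.toList := by
    rw [PySem.Chars.splitOn]
    exact goP _ _ _ _ (by omega)
  have h2 : PySem.Str.count s "1" = s.toList.count '1' := by
    rw [PySem.Str.count_eq]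
    rw [show ("1" : String).toList = ['1'] from rfl]
    rw [PySem.Chars.count]
    rw [if_neg (by simp)]
    rw [countGo _ _ _ le_rfl]
    omega
  simp only [h1, BtoZ, h2]
  rw [foldPB _ _ le_rfl]

-- ===== VERDICT (by name: the statement is the Claim_ definition above) =====
theorem solve_spec : Claim_equal_solve := by
  intro s _ hpre
  unfold Spec_solve
  unfold Pre_solve at hpre
  have hb : Bin s.toList := by
    intro c hc
    have h := List.all_eq_true.mp hpre c hc
    simpa using h
  rw [solveA s hb, solveB s]
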